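-- pv_equiv track=rewrite | github.com/HoangAnh1404/TSC-CoLight | Scenario/extract_subnet.py | longest_contiguous_subseq_in_set
-- ===== SOURCE A (Python) =====
-- from typing import List, Optional, Set, Tuple
--
-- def longest_contiguous_subseq_in_set(seq: List[str], allowed: Set[str]) -> Optional[Tuple[int, int]]:
--     best = None
--     best_len = 0
--     cur_start = None
--     for i, e in enumerate(seq):
--         if e in allowed:
--             if cur_start is None:
--                 cur_start = i
--         else:
--             if cur_start is not None:
--                 cur_len = i - cur_start
--                 if cur_len > best_len:
--                     best_len = cur_len
--                     best = (cur_start, i - 1)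
--                 cur_start = None
--     if cur_start is not None:
--         cur_len = len(seq) - cur_start
--         if cur_len > best_len:
--             best_len = cur_len
--             best = (cur_start, len(seq) - 1)
--     return best
-- ===== SOURCE B (Python) =====
-- from typing import List, Optional, Set, Tuple
--
-- def _runs(seq: List[str], allowed: Set[str]) -> List[Tuple[bool, int, int]]:
--     # split seq into maximal runs of equal membership-key: (key, start, end) with end exclusive
--     runs = []
--     pos = 0
--     n = len(seq)
--     while pos < n:
--         key = seq[pos] in allowed
--         end = pos + 1
--         while end < n and (seq[end] in allowed) == key:
--             end += 1
--         runs.append((key, pos, end))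
--         pos = end
--     return runs
--
-- def longest_contiguous_subseq_in_set(seq: List[str], allowed: Set[str]) -> Optional[Tuple[int, int]]:
--     best = None
--     best_len = 0
--     for key, start, end in _runs(seq, allowed):
--         if key and end - start > best_len:
--             best_len = end - start
--             best = (start, end - 1)
--     return best
-- ===== Notes on version B (the rewrite author's own statement) =====
-- stated objective: alternative
-- what changed: Replaces A's per-element state machine (cur_start/best_len with an end-of-loop flush) by a groupby-style two-phase algorithm: first split seq into maximal runs of equal membership, then scan the run list keeping the longest allowed run with strict >.
import Mathlib
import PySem

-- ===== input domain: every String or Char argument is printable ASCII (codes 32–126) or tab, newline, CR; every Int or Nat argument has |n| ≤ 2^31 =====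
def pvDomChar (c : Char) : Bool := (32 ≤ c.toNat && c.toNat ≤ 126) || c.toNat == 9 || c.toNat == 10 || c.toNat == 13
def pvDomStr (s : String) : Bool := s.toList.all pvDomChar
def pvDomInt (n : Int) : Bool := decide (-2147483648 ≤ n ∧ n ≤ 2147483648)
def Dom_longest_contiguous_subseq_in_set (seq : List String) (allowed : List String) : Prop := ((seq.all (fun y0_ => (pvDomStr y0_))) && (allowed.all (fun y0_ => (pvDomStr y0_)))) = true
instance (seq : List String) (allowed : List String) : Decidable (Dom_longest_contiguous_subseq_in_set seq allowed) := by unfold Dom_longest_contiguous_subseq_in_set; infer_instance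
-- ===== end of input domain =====

-- B replaces A's per-element cur_start/best_len state machine (with an end-of-loop flush) by a
-- groupby-style two-phase algorithm: split seq into maximal equal-membership runs, then scan the runs.

-- ===== PORT A =====
-- the for-loop over enumerate(seq): state (best, best_len, cur_start), index i carried explicitly
def pvALoop (allowed : List String) : List String → Int → Option (Int × Int) → Int → Option Int →
    Option (Int × Int) × Int × Option Int
  | [], _, best, best_len, cur_start => (best, best_len, cur_start)
  | e :: rest, i, best, best_len, cur_start =>
    if e ∈ allowed then
      match cur_start with
      | none => pvALoop allowed rest (i + 1) best best_len (some i)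
      | some c => pvALoop allowed rest (i + 1) best best_len (some c)
    else
      match cur_start with
      | some c =>
        if i - c > best_len then pvALoop allowed rest (i + 1) (some (c, i - 1)) (i - c) none
        else pvALoop allowed rest (i + 1) best best_len none
      | none => pvALoop allowed rest (i + 1) best best_len none

def longest_contiguous_subseq_in_set (seq : List String) (allowed : List String) : Option (Int × Int) :=
  match pvALoop allowed seq 0 none 0 none with
  | (best, best_len, some c) =>
    -- the final flush after the loop
    if (seq.length : Int) - c > best_len then some (c, (seq.length : Int) - 1) else best
  | (best, _, none) => best

-- ===== PORT B =====
-- _runs: split seq into maximal runs (key, start, end), end exclusive; the inner while = takeWhile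
def pvRuns (allowed : List String) : List String → Int → List (Bool × Int × Int)
  | [], _ => []
  | x :: xs, pos =>
    let key := decide (x ∈ allowed)
    let run := xs.takeWhile (fun e => decide (e ∈ allowed) == key)
    (key, pos, pos + 1 + (run.length : Int)) ::
      pvRuns allowed (xs.dropWhile (fun e => decide (e ∈ allowed) == key)) (pos + 1 + (run.length : Int))
  termination_by l => l.length
  decreasing_by
    simpa using Nat.lt_succ_of_le (List.length_dropWhile_le _ _)

-- the for-loop over the run list
def pvBLoop : List (Bool × Int × Int) → Option (Int × Int) → Int → Option (Int × Int)
  | [], best, _ => best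
  | (key, s, e) :: rs, best, best_len =>
    if key = true ∧ e - s > best_len then pvBLoop rs (some (s, e - 1)) (e - s)
    else pvBLoop rs best best_len

def longest_contiguous_subseq_in_set_alt (seq : List String) (allowed : List String) : Option (Int × Int) :=
  pvBLoop (pvRuns allowed seq 0) none 0

-- ===== PRECONDITION & SPEC =====
def Spec_longest_contiguous_subseq_in_set (seq : List String) (allowed : List String) (out : Option (Int × Int)) : Prop := out = longest_contiguous_subseq_in_set_alt seq allowed
instance (seq : List String) (allowed : List String) (out : Option (Int × Int)) : Decidable (Spec_longest_contiguous_subseq_in_set seq allowed out) := by unfold Spec_longest_contiguous_subseq_in_set; infer_instance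

-- ===== CLAIM (what is proved, stated in full; the proofs are below) =====
def Claim_equal_longest_contiguous_subseq_in_set : Prop := ∀ (seq : List String) (allowed : List String), Dom_longest_contiguous_subseq_in_set seq allowed → Spec_longest_contiguous_subseq_in_set seq allowed (longest_contiguous_subseq_in_set seq allowed)

-- ===== LEMMAS AND PROOFS =====

-- A's loop on suffix `l` from index `pos`, with the final flush applied at end-index `endpos`
def pvAFin (allowed : List String) (l : List String) (pos endpos : Int) (best : Option (Int × Int))
    (best_len : Int) (cs : Option Int) : Option (Int × Int) :=
  match pvALoop allowed l pos best best_len cs with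
  | (b, bl, some c) => if endpos - c > bl then some (c, endpos - 1) else b
  | (b, _, none) => b

theorem pvALoop_skip_true (allowed : List String) (run : List String)
    (h : ∀ e ∈ run, e ∈ allowed) :
    ∀ (rest : List String) (i : Int) (b : Option (Int × Int)) (bl : Int) (c : Int),
      pvALoop allowed (run ++ rest) i b bl (some c) =
        pvALoop allowed rest (i + (run.length : Int)) b bl (some c) := by
  induction run with
  | nil => intro rest i b bl c; simp
  | cons x xs ih =>
    intro rest i b bl c
    have hx : x ∈ allowed := h x (by simp)
    rw [List.cons_append, pvALoop]
    simp only [if_pos hx]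
    rw [ih (fun e he => h e (by simp [he]))]
    congr 1
    simp only [List.length_cons]
    push_cast
    omega

theorem pvALoop_skip_false (allowed : List String) (run : List String)
    (h : ∀ e ∈ run, e ∉ allowed) :
    ∀ (rest : List String) (i : Int) (b : Option (Int × Int)) (bl : Int),
      pvALoop allowed (run ++ rest) i b bl none =
        pvALoop allowed rest (i + (run.length : Int)) b bl none := by
  induction run with
  | nil => intro rest i b bl; simp
  | cons x xs ih =>
    intro rest i b bl
    have hx : x ∉ allowed := h x (by simp)
    rw [List.cons_append, pvALoop]
    simp only [if_neg hx]
    rw [ih (fun e he => h e (by simp [he]))]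
    congr 1
    simp only [List.length_cons]
    push_cast
    omega

-- a full allowed-run starting at pos: A processes it and ends up exactly in B's "compare the run" state
theorem pvAFin_true_step (allowed : List String) (x : String) (run rest : List String)
    (hx : x ∈ allowed) (hmem : ∀ e ∈ run, e ∈ allowed)
    (hrest : rest = [] ∨ ∃ y ys, rest = y :: ys ∧ y ∉ allowed)
    (pos endpos : Int) (best : Option (Int × Int)) (bl : Int)
    (hend : endpos = pos + ((x :: (run ++ rest)).length : Int)) :
    pvAFin allowed (x :: (run ++ rest)) pos endpos best bl none =
      pvAFin allowed rest (pos + 1 + (run.length : Int)) endpos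
        (if pos + 1 + (run.length : Int) - pos > bl
          then some (pos, pos + 1 + (run.length : Int) - 1) else best)
        (if pos + 1 + (run.length : Int) - pos > bl
          then pos + 1 + (run.length : Int) - pos else bl) none := by
  unfold pvAFin
  rw [pvALoop]
  simp only [if_pos hx]
  rw [pvALoop_skip_true allowed run hmem]
  rcases hrest with hnil | ⟨y, ys, hcons, hy⟩
  · subst hnil
    have hlen : endpos = pos + 1 + (run.length : Int) := by
      simp only [List.append_nil, List.length_cons] at hend
      push_cast at hend
      omega
    simp only [pvALoop]
    rw [hlen]
  · subst hcons
    simp only [pvALoop]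
    simp only [if_neg hy]
    split_ifs with h1 <;> rfl

theorem pvMain (allowed : List String) :
    ∀ (n : Nat) (l : List String), l.length ≤ n →
      ∀ (pos endpos : Int) (best : Option (Int × Int)) (bl : Int),
        endpos = pos + (l.length : Int) →
        pvAFin allowed l pos endpos best bl none = pvBLoop (pvRuns allowed l pos) best bl := by
  intro n
  induction n with
  | zero =>
    intro l hl pos endpos best bl hend
    have : l = [] := List.length_eq_zero_iff.mp (Nat.le_zero.mp hl)
    subst this
    simp [pvAFin, pvALoop, pvRuns, pvBLoop]
  | succ n ih =>
    intro l hl pos endpos best bl hend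
    match l with
    | [] => simp [pvAFin, pvALoop, pvRuns, pvBLoop]
    | x :: xs =>
      rw [pvRuns]
      set key := decide (x ∈ allowed) with hkey
      set p : String → Bool := fun e => decide (e ∈ allowed) == key with hp
      set run := xs.takeWhile p with hrun
      set rest := xs.dropWhile p with hrestdef
      have hsplit : run ++ rest = xs := List.takeWhile_append_dropWhile
      have hrunmem : ∀ e ∈ run, decide (e ∈ allowed) = key := by
        intro e he
        have := List.mem_takeWhile_imp (p := p) (l := xs) (by rw [← hrun]; exact he)
        simpa [hp] using this
      have hrestlen : rest.length ≤ n := by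
        have h1 : rest.length ≤ xs.length := List.length_dropWhile_le _ _
        have h2 : xs.length + 1 ≤ n + 1 := by simpa using hl
        omega
      by_cases hx : x ∈ allowed
      · have hkt : key = true := by simp [hkey, hx]
        have hmem : ∀ e ∈ run, e ∈ allowed := by
          intro e he; have := hrunmem e he; rw [hkt] at this; simpa using this
        have hrest : rest = [] ∨ ∃ y ys, rest = y :: ys ∧ y ∉ allowed := by
          cases hr : rest with
          | nil => exact Or.inl rfl
          | cons y ys =>
            refine Or.inr ⟨y, ys, rfl, ?_⟩
            have h' := List.head?_dropWhile_not (p := p) (l := xs)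
            rw [← hrestdef, hr] at h'
            simp only [List.head?_cons] at h'
            simp only [hp, hkt] at h'
            simpa using h'
        have hxs : x :: xs = x :: (run ++ rest) := by rw [hsplit]
        rw [hxs] at hend ⊢
        rw [pvAFin_true_step allowed x run rest hx hmem hrest pos endpos best bl hend]
        rw [ih rest hrestlen (pos + 1 + (run.length : Int)) endpos _ _
          (by simp at hend ⊢; omega)]
        rw [pvBLoop]
        simp only [hkt, true_and]
        split_ifs with h1 <;> rfl
      · have hkf : key = false := by simp [hkey, hx]
        have hmem : ∀ e ∈ (x :: run), e ∉ allowed := by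
          intro e he
          rcases List.mem_cons.mp he with h | h
          · subst h; exact hx
          · have := hrunmem e h; rw [hkf] at this; simpa using this
        have hxs : x :: xs = (x :: run) ++ rest := by rw [List.cons_append, hsplit]
        have hA : pvAFin allowed (x :: xs) pos endpos best bl none =
            pvAFin allowed rest (pos + 1 + (run.length : Int)) endpos best bl none := by
          unfold pvAFin
          rw [hxs, pvALoop_skip_false allowed (x :: run) hmem]
          have : pos + ((x :: run).length : Int) = pos + 1 + (run.length : Int) := by
            simp only [List.length_cons]; push_cast; omega
          rw [this]
        rw [hA, ih rest hrestlen (pos + 1 + (run.length : Int)) endpos best bl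
          (by rw [hxs] at hend; simp at hend ⊢; omega)]
        rw [pvBLoop]
        simp [hkf]

theorem pvA_eq_fin (seq allowed : List String) :
    longest_contiguous_subseq_in_set seq allowed =
      pvAFin allowed seq 0 (seq.length : Int) none 0 none := by
  unfold longest_contiguous_subseq_in_set pvAFin
  rfl

-- ===== VERDICT (by name: the statement is the Claim_ definition above) =====
theorem longest_contiguous_subseq_in_set_spec : Claim_equal_longest_contiguous_subseq_in_set := by
  intro seq allowed _
  unfold Spec_longest_contiguous_subseq_in_set longest_contiguous_subseq_in_set_alt
  rw [pvA_eq_fin]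
  exact pvMain allowed seq.length seq le_rfl 0 (seq.length : Int) none 0 (by omega)
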